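-- pv_equiv track=rewrite | github.com/malone-c/advent-of-code-23 | 11/11.py | cosmic
-- ===== SOURCE A (Python) =====
-- def cosmic(data, galaxies):
--     res = 0
--     for i in range(len(galaxies)):
--         for j in range(i+1, len(galaxies)):
--             # Compute shortest path
--             (r1, c1), (r2, c2) = galaxies[i], galaxies[j]
--             if r1 > r2:
--                 r1, r2 = r2, r1
--             if c1 > c2:
--                 c1, c2 = c2, c1
--
--             # (r1, c1) always to the top left of (r2, c2)
--             count = 0
--             while r1 < r2:
--                 count += data[r1][c1] if data[r1][c1] else 1
--                 r1 += 1
--             while c1 < c2: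
--                 count += data[r1][c1] if data[r1][c1] else 1
--                 c1 += 1
--
--             res += count
--     return res
-- ===== SOURCE B (Python) =====
-- def cosmic(data, galaxies):
--     if len(galaxies) < 2:
--         return 0  # no pairs
--     # prefix sums of weights per row and per (needed) column: each pair costs O(1)
--     maxc = max(c for _, c in galaxies)
--     rowp = []
--     for row in data:
--         acc = [0]
--         s = 0
--         for v in row:
--             s += v if v else 1
--             acc.append(s)
--         rowp.append(acc)
--     colp = []
--     for c in range(maxc + 1):
--         acc = [0]
--         s = 0
--         for row in data:
--             s += row[c] if row[c] else 1
--             acc.append(s)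
--         colp.append(acc)
--     res = 0
--     n = len(galaxies)
--     for i in range(n):
--         r1, c1 = galaxies[i]
--         for j in range(i + 1, n):
--             r2, c2 = galaxies[j]
--             ra, rb = (r1, r2) if r1 <= r2 else (r2, r1)
--             ca, cb = (c1, c2) if c1 <= c2 else (c2, c1)
--             res += colp[ca][rb] - colp[ca][ra] + rowp[rb][cb] - rowp[rb][ca]
--     return res
-- ===== Notes on version B (the rewrite author's own statement) =====
-- stated objective: faster
-- what changed: B precomputes per-row and per-needed-column prefix sums of the cell weights once, so each galaxy pair costs four O(1) range lookups instead of walking the whole L-shaped path cell by cell.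
-- outside the precondition, e.g. on cosmic([[5], [6, 7]], [(0, 0), (1, 1)]): A returns 11, B raises IndexError; on cosmic([[5, 6], [7, 8]], [(0, 0), (-1, -1)]): A returns 14, B returns -23
import Mathlib
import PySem

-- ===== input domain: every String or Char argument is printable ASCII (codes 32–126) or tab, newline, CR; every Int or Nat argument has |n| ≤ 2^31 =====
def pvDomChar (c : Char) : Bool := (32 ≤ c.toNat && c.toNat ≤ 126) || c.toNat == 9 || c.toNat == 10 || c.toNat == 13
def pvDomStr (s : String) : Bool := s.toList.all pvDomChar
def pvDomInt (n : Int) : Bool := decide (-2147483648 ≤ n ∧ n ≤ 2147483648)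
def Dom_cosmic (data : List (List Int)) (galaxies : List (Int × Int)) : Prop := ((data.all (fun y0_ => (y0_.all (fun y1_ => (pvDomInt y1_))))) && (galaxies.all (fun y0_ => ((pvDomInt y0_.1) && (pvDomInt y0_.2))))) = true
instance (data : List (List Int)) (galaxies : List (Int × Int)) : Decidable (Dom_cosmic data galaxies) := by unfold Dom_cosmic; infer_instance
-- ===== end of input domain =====

-- B replaces A's per-pair cell-by-cell L-path walk by precomputed per-row and
-- per-column prefix sums of the weights, making each pair O(1) (objective: faster).

-- ===== PORT A =====
-- `data[r][c] if data[r][c] else 1`; the match arms returning 0 correspond to a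
-- Python IndexError (excluded by Pre_cosmic).
def pvCellA (data : List (List Int)) (r c : Int) : Int :=
  match PySem.List.pyGet? data r with
  | none => 0
  | some row =>
    match PySem.List.pyGet? row c with
    | none => 0
    | some v => if v = 0 then 1 else v

-- `while r1 < r2: count += …; r1 += 1`, fuel = (r2 - r1).toNat
def pvColWalk (data : List (List Int)) (c : Int) : Int → Nat → Int
  | _, 0 => 0
  | r1, n + 1 => pvCellA data r1 c + pvColWalk data c (r1 + 1) n

-- `while c1 < c2: count += …; c1 += 1`
def pvRowWalk (data : List (List Int)) (r : Int) : Int → Nat → Int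
  | _, 0 => 0
  | c1, n + 1 => pvCellA data r c1 + pvRowWalk data r (c1 + 1) n

def pvPairA (data : List (List Int)) (g1 g2 : Int × Int) : Int :=
  let p := if g1.1 > g2.1 then (g2.1, g1.1) else (g1.1, g2.1)
  let q := if g1.2 > g2.2 then (g2.2, g1.2) else (g1.2, g2.2)
  pvColWalk data q.1 p.1 (p.2 - p.1).toNat + pvRowWalk data p.2 q.1 (q.2 - q.1).toNat

def cosmic (data : List (List Int)) (galaxies : List (Int × Int)) : Int :=
  (List.range galaxies.length).foldl (fun res i =>
    (List.range' (i + 1) (galaxies.length - (i + 1))).foldl (fun res2 j =>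
      res2 + pvPairA data (galaxies.getD i (0, 0)) (galaxies.getD j (0, 0))) res) 0

-- ===== PORT B =====
def pvWB (v : Int) : Int := if v = 0 then 1 else v

-- `acc = [0]; s = 0; for v in l: s += w(v); acc.append(s)`
def pvPrefAux (s : Int) : List Int → List Int
  | [] => []
  | v :: t => (s + pvWB v) :: pvPrefAux (s + pvWB v) t

def pvPref (l : List Int) : List Int := 0 :: pvPrefAux 0 l

-- the c-th column of the grid, as read by Source B's inner loop `w(row[c])`
def pvColVals (data : List (List Int)) (c : Nat) : List Int :=
  data.map (fun row => row.getD c 0)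

-- `t[i][j]`; 0 on IndexError (outside Pre_cosmic)
def pvLook2 (t : List (List Int)) (i j : Int) : Int :=
  match PySem.List.pyGet? t i with
  | none => 0
  | some l => (PySem.List.pyGet? l j).getD 0

def cosmic_alt (data : List (List Int)) (galaxies : List (Int × Int)) : Int :=
  if galaxies.length < 2 then 0
  else
    let maxc := ((PySem.List.max? (galaxies.map (fun g => g.2)) (fun x => x)).getD 0)
    let rowp := data.map pvPref
    let colp := (List.range (maxc.toNat + 1)).map (fun c => pvPref (pvColVals data c))
    (List.range galaxies.length).foldl (fun res i =>
      (List.range' (i + 1) (galaxies.length - (i + 1))).foldl (fun res2 j =>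
        let g1 := galaxies.getD i (0, 0)
        let g2 := galaxies.getD j (0, 0)
        let p := if g1.1 ≤ g2.1 then (g1.1, g2.1) else (g2.1, g1.1)
        let q := if g1.2 ≤ g2.2 then (g1.2, g2.2) else (g2.2, g1.2)
        res2 + (pvLook2 colp q.1 p.2 - pvLook2 colp q.1 p.1 +
                (pvLook2 rowp p.2 q.2 - pvLook2 rowp p.2 q.1))) res) 0

-- ===== PRECONDITION & SPEC =====
-- Pre_ excludes galaxies whose coordinates are negative or reach beyond some row
-- of the grid: there A either raises IndexError or silently wraps via Python's
-- negative indexing, and B's prefix-sum table lookups raise or land on accidental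
-- entries — a malformed-input corner neither value of which anyone would specify.
def Pre_cosmic (data : List (List Int)) (galaxies : List (Int × Int)) : Prop :=
  galaxies.length < 2 ∨
    ∀ g ∈ galaxies, 0 ≤ g.1 ∧ g.1 < (data.length : Int) ∧ 0 ≤ g.2 ∧
      ∀ row ∈ data, g.2 < (row.length : Int)

instance (data : List (List Int)) (galaxies : List (Int × Int)) : Decidable (Pre_cosmic data galaxies) := by
  unfold Pre_cosmic; infer_instance

def pvWitness_cosmic : List (List Int) × (List (Int × Int)) :=
  ([[2, 0], [0, 3]], [(0, 0), (1, 1)])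

def Spec_cosmic (data : List (List Int)) (galaxies : List (Int × Int)) (out : Int) : Prop := out = cosmic_alt data galaxies
instance (data : List (List Int)) (galaxies : List (Int × Int)) (out : Int) : Decidable (Spec_cosmic data galaxies out) := by unfold Spec_cosmic; infer_instance

-- ===== CLAIM (what is proved, stated in full; the proofs are below) =====
def Claim_equal_cosmic : Prop := ∀ (data : List (List Int)) (galaxies : List (Int × Int)), Dom_cosmic data galaxies → Pre_cosmic data galaxies → Spec_cosmic data galaxies (cosmic data galaxies)

-- ===== LEMMAS AND PROOFS =====
-- weighted prefix sum: sum of pvWB over the first k cells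
def pvS (l : List Int) (k : Nat) : Int := ((l.take k).map pvWB).sum

theorem pvS_succ (l : List Int) (k : Nat) (hk : k < l.length) :
    pvS l (k + 1) = pvS l k + pvWB (l.getD k 0) := by
  have ht : l.take (k + 1) = l.take k ++ [l[k]] := by
    rw [List.take_add_one]; simp [List.getElem?_eq_getElem hk]
  unfold pvS
  rw [ht, List.map_append, List.sum_append]
  simp [List.getD_eq_getElem?_getD, List.getElem?_eq_getElem hk]

theorem pvPrefAux_getD (l : List Int) (s : Int) (k : Nat) (hk : k < l.length) :
    (pvPrefAux s l).getD k 0 = s + pvS l (k + 1) := by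
  induction l generalizing s k with
  | nil => simp at hk
  | cons v t ih =>
    cases k with
    | zero => simp [pvPrefAux, pvS]
    | succ k =>
      simp only [pvPrefAux, List.getD_cons_succ]
      rw [ih (s + pvWB v) k (by simpa using hk)]
      simp [pvS, List.take_succ_cons]
      ring

theorem pvPref_getD (l : List Int) (k : Nat) (hk : k ≤ l.length) :
    (pvPref l).getD k 0 = pvS l k := by
  cases k with
  | zero => simp [pvPref, pvS]
  | succ k =>
    simp only [pvPref, List.getD_cons_succ]
    rw [pvPrefAux_getD l 0 k (by omega)]
    ring

theorem pvCellA_eq (data : List (List Int)) (r c : Int) (hr0 : 0 ≤ r)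
    (hr : r.toNat < data.length) (hc0 : 0 ≤ c)
    (hc : c.toNat < data[r.toNat].length) :
    pvCellA data r c = pvWB (data[r.toNat].getD c.toNat 0) := by
  unfold pvCellA
  simp only [PySem.List.pyGet?_eq_some_getElem (xs := data) hr0 (by omega),
    PySem.List.pyGet?_eq_some_getElem (xs := data[r.toNat]) hc0 (by omega)]
  simp [pvWB, List.getD_eq_getElem?_getD, List.getElem?_eq_getElem hc]

theorem pvColVals_getD (data : List (List Int)) (c : Nat) (r : Nat)
    (hr : r < data.length) :
    (pvColVals data c).getD r 0 = data[r].getD c 0 := by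
  unfold pvColVals
  simp [List.getD_eq_getElem?_getD, hr]

theorem pvColWalk_eq (data : List (List Int)) (c : Int) (hc : 0 ≤ c)
    (hcol : ∀ row ∈ data, c < (row.length : Int)) :
    ∀ (n : Nat) (r1 : Int), 0 ≤ r1 → r1.toNat + n ≤ data.length →
      pvColWalk data c r1 n =
        pvS (pvColVals data c.toNat) (r1.toNat + n) - pvS (pvColVals data c.toNat) r1.toNat := by
  intro n
  induction n with
  | zero => intro r1 _ _; simp [pvColWalk]
  | succ n ih =>
    intro r1 hr1 hlen
    have hr : r1.toNat < data.length := by omega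
    have hm : data[r1.toNat] ∈ data := List.getElem_mem _
    have hclen : c.toNat < data[r1.toNat].length := by
      have := hcol _ hm; omega
    have hcv : r1.toNat < (pvColVals data c.toNat).length := by
      simpa [pvColVals] using hr
    have hstep : pvCellA data r1 c =
        pvS (pvColVals data c.toNat) (r1.toNat + 1) - pvS (pvColVals data c.toNat) r1.toNat := by
      rw [pvS_succ _ _ hcv, pvCellA_eq data r1 c hr1 hr hc hclen,
        pvColVals_getD data c.toNat r1.toNat hr]
      ring
    have ht : (r1 + 1).toNat = r1.toNat + 1 := by omega
    rw [pvColWalk, hstep, ih (r1 + 1) (by omega) (by omega)]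
    rw [ht]
    ring_nf

theorem pvRowWalk_eq (data : List (List Int)) (r : Int) (row : List Int)
    (hr : 0 ≤ r) (hrow : (r.toNat < data.length) ∧ data.getD r.toNat [] = row) :
    ∀ (n : Nat) (c1 : Int), 0 ≤ c1 → c1.toNat + n ≤ row.length →
      pvRowWalk data r c1 n = pvS row (c1.toNat + n) - pvS row c1.toNat := by
  obtain ⟨hr1, hrow⟩ := hrow
  intro n
  induction n with
  | zero => intro c1 _ _; simp [pvRowWalk]
  | succ n ih =>
    intro c1 hc1 hlen
    have hc : c1.toNat < row.length := by omega
    have hrowg : data[r.toNat] = row := by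
      rw [← hrow]; simp [List.getD_eq_getElem?_getD, List.getElem?_eq_getElem hr1]
    have hstep : pvCellA data r c1 = pvS row (c1.toNat + 1) - pvS row c1.toNat := by
      rw [pvCellA_eq data r c1 hr hr1 hc1 (by rw [hrowg]; exact hc), hrowg,
        pvS_succ _ _ hc]
      ring
    have ht : (c1 + 1).toNat = c1.toNat + 1 := by omega
    rw [pvRowWalk, hstep, ih (c1 + 1) (by omega) (by omega)]
    rw [ht]
    ring_nf

theorem pvPrefAux_length (l : List Int) (s : Int) : (pvPrefAux s l).length = l.length := by
  induction l generalizing s with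
  | nil => rfl
  | cons v t ih => simp [pvPrefAux, ih]

theorem pvLook2_eval (t : List (List Int)) (i j : Int) (hi0 : 0 ≤ i)
    (hi : i.toNat < t.length) (hj0 : 0 ≤ j) (hj : j.toNat < t[i.toNat].length) :
    pvLook2 t i j = t[i.toNat].getD j.toNat 0 := by
  unfold pvLook2
  simp only [PySem.List.pyGet?_eq_some_getElem (xs := t) hi0 (by omega),
    PySem.List.pyGet?_eq_some_getElem (xs := t[i.toNat]) hj0 (by omega)]
  simp [List.getD_eq_getElem?_getD, List.getElem?_eq_getElem hj]

-- the heart of the equivalence: one L-path walk = four prefix-table lookups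
theorem pvCore (data : List (List Int)) (M ra rb ca cb : Int)
    (h0ra : 0 ≤ ra) (hrr : ra ≤ rb) (hrb : rb < (data.length : Int))
    (h0ca : 0 ≤ ca) (hcc : ca ≤ cb) (hcb : ∀ row ∈ data, cb < (row.length : Int))
    (hca : ca ≤ M) :
    pvColWalk data ca ra (rb - ra).toNat + pvRowWalk data rb ca (cb - ca).toNat =
      pvLook2 ((List.range (M.toNat + 1)).map (fun c => pvPref (pvColVals data c))) ca rb -
        pvLook2 ((List.range (M.toNat + 1)).map (fun c => pvPref (pvColVals data c))) ca ra +
        (pvLook2 (data.map pvPref) rb cb - pvLook2 (data.map pvPref) rb ca) := by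
  have hrbn : rb.toNat < data.length := by omega
  have hcan : ca.toNat < M.toNat + 1 := by omega
  have hcol : ∀ row ∈ data, ca < (row.length : Int) := fun row h => lt_of_le_of_lt hcc (hcb row h)
  have hcoln : (pvColVals data ca.toNat).length = data.length := by simp [pvColVals]
  have hprefcol : ∀ (l : List Int), (pvPref l).length = l.length + 1 := by
    intro l; simp [pvPref, pvPrefAux_length]
  have hcolp_get : ((List.range (M.toNat + 1)).map (fun c => pvPref (pvColVals data c)))[ca.toNat]'(by simpa using hcan) = pvPref (pvColVals data ca.toNat) := by
    simp
  have hlookcol : ∀ (x : Int), 0 ≤ x → x.toNat ≤ data.length →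
      pvLook2 ((List.range (M.toNat + 1)).map (fun c => pvPref (pvColVals data c))) ca x =
        pvS (pvColVals data ca.toNat) x.toNat := by
    intro x hx0 hx
    rw [pvLook2_eval _ ca x h0ca (by simpa using hcan) hx0 (by rw [hcolp_get, hprefcol, hcoln]; omega)]
    rw [hcolp_get, pvPref_getD _ _ (by rw [hcoln]; omega)]
  -- the row data[rb]
  have hrowmem : data[rb.toNat] ∈ data := List.getElem_mem _
  have hcbrow : cb.toNat < data[rb.toNat].length := by
    have := hcb _ hrowmem; omega
  have hlookrow : ∀ (x : Int), 0 ≤ x → x.toNat ≤ data[rb.toNat].length →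
      pvLook2 (data.map pvPref) rb x = pvS data[rb.toNat] x.toNat := by
    intro x hx0 hx
    have hg : (data.map pvPref)[rb.toNat]'(by simpa using hrbn) = pvPref data[rb.toNat] := by simp
    rw [pvLook2_eval _ rb x (by omega) (by simpa using hrbn) hx0 (by rw [hg, hprefcol]; omega)]
    rw [hg, pvPref_getD _ _ (by omega)]
  rw [hlookcol rb (by omega) (by omega), hlookcol ra h0ra (by omega),
    hlookrow cb (by omega) (by omega), hlookrow ca h0ca (by omega)]
  rw [pvColWalk_eq data ca h0ca hcol (rb - ra).toNat ra h0ra (by omega)]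
  rw [pvRowWalk_eq data rb data[rb.toNat] (by omega) ⟨hrbn, by simp [List.getD_eq_getElem?_getD, List.getElem?_eq_getElem hrbn]⟩ (cb - ca).toNat ca h0ca (by omega)]
  have h1 : ra.toNat + (rb - ra).toNat = rb.toNat := by omega
  have h2 : ca.toNat + (cb - ca).toNat = cb.toNat := by omega
  rw [h1, h2]

-- ===== VERDICT (by name: the statement is the Claim_ definition above) =====
theorem cosmic_spec : Claim_equal_cosmic := by
  intro data galaxies _ hpre
  unfold Spec_cosmic cosmic cosmic_alt
  by_cases hsmall : galaxies.length < 2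
  · rw [if_pos hsmall]
    rcases galaxies with _ | ⟨g, _ | ⟨g2, t⟩⟩
    · rfl
    · simp [List.range_succ]
    · simp at hsmall
  · have hpre : ∀ g ∈ galaxies, 0 ≤ g.1 ∧ g.1 < (data.length : Int) ∧ 0 ≤ g.2 ∧
        ∀ row ∈ data, g.2 < (row.length : Int) := hpre.resolve_left hsmall
    have hnil : galaxies ≠ [] := by
      intro h; rw [h] at hsmall; simp at hsmall
    rw [if_neg hsmall]
    simp only []
    apply PySem.List.foldl_congr_mem
    intro acc i hi
    apply PySem.List.foldl_congr_mem
    intro acc2 j hj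
    have hi' : i < galaxies.length := List.mem_range.mp hi
    have hj' : j < galaxies.length := by
      have := List.mem_range'_1.mp hj; omega
    have hg1 : galaxies.getD i (0, 0) ∈ galaxies := by
      rw [List.getD_eq_getElem _ _ hi']; exact List.getElem_mem _
    have hg2 : galaxies.getD j (0, 0) ∈ galaxies := by
      rw [List.getD_eq_getElem _ _ hj']; exact List.getElem_mem _
    set g1 := galaxies.getD i (0, 0) with hdef1
    set g2 := galaxies.getD j (0, 0) with hdef2
    obtain ⟨hr1, hr1', hc1, hrow1⟩ := hpre g1 hg1
    obtain ⟨hr2, hr2', hc2, hrow2⟩ := hpre g2 hg2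
    -- the maximum galaxy column bounds both columns
    set M := ((PySem.List.max? (galaxies.map (fun g => g.2)) (fun x => x)).getD 0) with hMdef
    have hm : ∃ m, PySem.List.max? (galaxies.map (fun g => g.2)) (fun x => x) = some m := by
      cases h : PySem.List.max? (galaxies.map (fun g => g.2)) (fun x => x) with
      | none =>
        exact absurd (List.map_eq_nil_iff.mp ((PySem.List.max?_eq_none_iff _ _).mp h)) hnil
      | some m => exact ⟨m, rfl⟩
    obtain ⟨m, hm⟩ := hm
    have hMmax : ∀ g ∈ galaxies, g.2 ≤ M := by
      intro g hg
      have := PySem.List.max?_isMax hm g.2 (List.mem_map.mpr ⟨g, hg, rfl⟩)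
      simpa [hMdef, hm] using this
    have hM1 : g1.2 ≤ M := hMmax g1 hg1
    have hM2 : g2.2 ≤ M := hMmax g2 hg2
    congr 1
    simp only [pvPairA]
    have hA : (if g1.1 > g2.1 then (g2.1, g1.1) else (g1.1, g2.1)) =
        (if g1.1 ≤ g2.1 then (g1.1, g2.1) else (g2.1, g1.1)) := by
      rcases le_or_gt g1.1 g2.1 with h | h
      · rw [if_neg (not_lt.mpr h), if_pos h]
      · rw [if_pos h, if_neg (not_le.mpr h)]
    have hC : (if g1.2 > g2.2 then (g2.2, g1.2) else (g1.2, g2.2)) =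
        (if g1.2 ≤ g2.2 then (g1.2, g2.2) else (g2.2, g1.2)) := by
      rcases le_or_gt g1.2 g2.2 with h | h
      · rw [if_neg (not_lt.mpr h), if_pos h]
      · rw [if_pos h, if_neg (not_le.mpr h)]
    rw [hA, hC]
    set P := if g1.1 ≤ g2.1 then (g1.1, g2.1) else (g2.1, g1.1) with hP
    set Q := if g1.2 ≤ g2.2 then (g1.2, g2.2) else (g2.2, g1.2) with hQ
    have hPb : 0 ≤ P.1 ∧ P.1 ≤ P.2 ∧ P.2 < (data.length : Int) := by
      rw [hP]; split_ifs <;> exact ⟨by omega, by omega, by omega⟩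
    have hQb : 0 ≤ Q.1 ∧ Q.1 ≤ Q.2 := by
      rw [hQ]; split_ifs <;> exact ⟨by omega, by omega⟩
    have hQrow : ∀ row ∈ data, Q.2 < (row.length : Int) := by
      rw [hQ]; split_ifs <;> simpa using fun row h => by
        first | exact hrow2 row h | exact hrow1 row h
    have hQM : Q.1 ≤ M := by
      rw [hQ]; split_ifs <;> simp <;> omega
    exact pvCore data M P.1 P.2 Q.1 Q.2 hPb.1 hPb.2.1 hPb.2.2 hQb.1 hQb.2 hQrow hQM
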